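-- pv_equiv track=rewrite | github.com/axelsmagichammer/A112509 | src/tools/debruijn_analysis.py | all_k_substrings_distinct
-- ===== SOURCE A (Python) =====
-- def all_k_substrings_distinct(s, k):
--     """Check if all k-length substrings of s are distinct."""
--     n = len(s)
--     if k > n:
--         return True
--     seen = set()
--     for i in range(n - k + 1):
--         sub = s[i:i+k]
--         if sub in seen:
--             return False
--         seen.add(sub)
--     return True
-- ===== SOURCE B (Python) =====
-- def all_k_substrings_distinct(s, k):
--     """Check if all k-length substrings of s are distinct (sort, then scan neighbours)."""
--     if k < 0:
--         return True  # there are no substrings of negative length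
--     subs = sorted(s[i:i+k] for i in range(len(s) - k + 1))
--     return all(subs[j] != subs[j + 1] for j in range(len(subs) - 1))
-- ===== Notes on version B (the rewrite author's own statement) =====
-- stated objective: alternative
-- what changed: Replaces the incremental seen-set membership loop (with its k>n early return) by sort-all-substrings-then-scan-adjacent-pairs, returning vacuous True for negative k where no substring of that length exists.
-- intended difference: For k < 0, A returns False because Python slicing yields n-k+1 phantom empty strings that collide in its seen set; B returns True, the intended value, since there are no substrings of negative length to collide. — e.g. on all_k_substrings_distinct("", -1): A returns false, B returns true
import Mathlib
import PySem

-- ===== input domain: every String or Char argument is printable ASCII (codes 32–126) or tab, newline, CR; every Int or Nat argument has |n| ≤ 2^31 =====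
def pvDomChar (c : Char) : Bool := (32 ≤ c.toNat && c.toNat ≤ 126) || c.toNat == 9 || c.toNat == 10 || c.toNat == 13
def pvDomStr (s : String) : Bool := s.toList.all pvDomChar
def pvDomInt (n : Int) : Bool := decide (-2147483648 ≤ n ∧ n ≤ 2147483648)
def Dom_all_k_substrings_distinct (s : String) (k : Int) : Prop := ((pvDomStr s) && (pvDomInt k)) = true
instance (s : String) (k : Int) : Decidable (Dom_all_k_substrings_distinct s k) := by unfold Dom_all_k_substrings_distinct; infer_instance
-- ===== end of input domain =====

-- B replaces A's incremental seen-set membership loop by sort-all-substrings-then-scan-adjacent-pairs,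
-- with vacuous True for negative k; equal return value proved outside D_ (negative k), where
-- the two values provably differ.

-- ===== PORT A =====
-- 'for i in range(n - k + 1)' with early 'return False' and the growing 'seen' set;
-- the loop counter i is tracked as an Int, the number of remaining iterations as the Nat fuel
def pvALoop (cs : List Char) (k : Int) : Nat → Int → PySem.Set String → Bool
  | 0, _, _ => true
  | Nat.succ fuel, i, seen =>
    let sub := String.ofList (PySem.List.slice cs (some i) (some (i + k)))
    if PySem.Set.contains seen sub then false
    else pvALoop cs k fuel (i + 1) (PySem.Set.add seen sub)

def all_k_substrings_distinct (s : String) (k : Int) : Bool :=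
  let n : Int := s.toList.length
  if k > n then true
  else pvALoop s.toList k (n - k + 1).toNat 0 PySem.Set.empty

-- ===== PORT B =====
-- 'all(subs[j] != subs[j+1] for j in range(len(subs)-1))': scan adjacent pairs
def pvBAdj : List String → Bool
  | [] => true
  | [_] => true
  | x :: y :: rest => if x = y then false else pvBAdj (y :: rest)

-- 'sorted(...)' is ported as List.mergeSort (stable ascending sort, like Python's sorted)
def all_k_substrings_distinct_alt (s : String) (k : Int) : Bool :=
  if k < 0 then true
  else
    let subs := ((PySem.List.pyRange 0 ((s.toList.length : Int) - k + 1) 1).map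
        (fun i => String.ofList (PySem.List.slice s.toList (some i) (some (i + k))))).mergeSort
      (fun a b => a ≤ b)
    pvBAdj subs

-- ===== PRECONDITION & SPEC =====
-- For k < 0, A returns False because Python slicing yields n-k+1 phantom empty strings that
-- collide in its seen set; B returns True, the intended value, since there are no substrings
-- of negative length to collide.
def D_all_k_substrings_distinct (s : String) (k : Int) : Prop := k < 0
instance (s : String) (k : Int) : Decidable (D_all_k_substrings_distinct s k) := by unfold D_all_k_substrings_distinct; infer_instance

def Spec_all_k_substrings_distinct (s : String) (k : Int) (out : Bool) : Prop := ¬ D_all_k_substrings_distinct s k → out = all_k_substrings_distinct_alt s k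
instance (s : String) (k : Int) (out : Bool) : Decidable (Spec_all_k_substrings_distinct s k out) := by unfold Spec_all_k_substrings_distinct; infer_instance

def pvDiffWitness_all_k_substrings_distinct : String × Int := ("", -1)
def pvDiffWitnessOut_all_k_substrings_distinct : Bool × Bool := (false, true)

-- ===== CLAIM (what is proved, stated in full; the proofs are below) =====
def Claim_unchanged_all_k_substrings_distinct : Prop := ∀ (s : String) (k : Int), Dom_all_k_substrings_distinct s k → Spec_all_k_substrings_distinct s k (all_k_substrings_distinct s k)
def Claim_changed_all_k_substrings_distinct : Prop := Dom_all_k_substrings_distinct (pvDiffWitness_all_k_substrings_distinct.1) (pvDiffWitness_all_k_substrings_distinct.2) ∧ D_all_k_substrings_distinct (pvDiffWitness_all_k_substrings_distinct.1) (pvDiffWitness_all_k_substrings_distinct.2) ∧ all_k_substrings_distinct (pvDiffWitness_all_k_substrings_distinct.1) (pvDiffWitness_all_k_substrings_distinct.2) = pvDiffWitnessOut_all_k_substrings_distinct.1 ∧ all_k_substrings_distinct_alt (pvDiffWitness_all_k_substrings_distinct.1) (pvDiffWitness_all_k_substrings_distinct.2) = pvDiffWitnessOut_all_k_substrings_distinct.2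 ∧ pvDiffWitnessOut_all_k_substrings_distinct.1 ≠ pvDiffWitnessOut_all_k_substrings_distinct.2
def Claim_exact_all_k_substrings_distinct : Prop := ∀ (s : String) (k : Int), Dom_all_k_substrings_distinct s k → D_all_k_substrings_distinct s k → all_k_substrings_distinct s k ≠ all_k_substrings_distinct_alt s k

-- ===== LEMMAS AND PROOFS =====

-- the substrings examined by A's loop, starting at index i, for 'fuel' iterations
def pvSubs (cs : List Char) (k : Int) (i : Int) (fuel : Nat) : List String :=
  (List.range fuel).map (fun (j : Nat) => String.ofList (PySem.List.slice cs (some (i + (j : Int))) (some (i + (j : Int) + k))))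

theorem pvSubs_length (cs : List Char) (k : Int) (i : Int) (fuel : Nat) :
    (pvSubs cs k i fuel).length = fuel := by simp [pvSubs]

theorem pvSubs_getElem (cs : List Char) (k : Int) (i : Int) (fuel : Nat) (t : Nat) (ht : t < fuel) :
    (pvSubs cs k i fuel)[t]'(by rw [pvSubs_length]; exact ht) =
      String.ofList (PySem.List.slice cs (some (i + (t : Int))) (some (i + (t : Int) + k))) := by
  simp [pvSubs]

theorem pvSubs_succ (cs : List Char) (k : Int) (i : Int) (fuel : Nat) :
    pvSubs cs k i (fuel + 1) =
      String.ofList (PySem.List.slice cs (some i) (some (i + k))) :: pvSubs cs k (i + 1) fuel := by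
  unfold pvSubs
  rw [List.range_succ_eq_map, List.map_cons, List.map_map]
  simp only [Nat.cast_zero, add_zero, List.cons.injEq]
  refine ⟨by trivial, List.map_congr_left ?_⟩
  intro j _
  simp only [Function.comp_apply, Nat.succ_eq_add_one, Nat.cast_add, Nat.cast_one]
  rw [show i + ((j : Int) + 1) = i + 1 + (j : Int) from by ring]

-- A's loop returns true iff the substring list is duplicate-free and disjoint from 'seen'
theorem pvALoop_iff (cs : List Char) (k : Int) :
    ∀ (fuel : Nat) (i : Int) (seen : PySem.Set String),
      (pvALoop cs k fuel i seen = true ↔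
        ((pvSubs cs k i fuel).Nodup ∧ ∀ x ∈ pvSubs cs k i fuel, x ∉ seen)) := by
  intro fuel
  induction fuel with
  | zero => intro i seen; simp [pvALoop, pvSubs]
  | succ fuel ih =>
    intro i seen
    rw [pvSubs_succ]
    by_cases hc : String.ofList (PySem.List.slice cs (some i) (some (i + k))) ∈ seen
    · have hcc : PySem.Set.contains seen (String.ofList (PySem.List.slice cs (some i) (some (i + k)))) = true := by
        simp [PySem.Set.contains, hc]
      simp only [pvALoop, hcc, if_true]
      constructor
      · intro h; cases h
      · rintro ⟨_, hall⟩
        exact absurd hc (hall _ (by simp))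
    · have hcc : PySem.Set.contains seen (String.ofList (PySem.List.slice cs (some i) (some (i + k)))) = false := by
        simp [PySem.Set.contains, hc]
      simp only [pvALoop, hcc, Bool.false_eq_true, if_false, ih,
        List.nodup_cons, List.mem_cons, PySem.Set.mem_add]
      constructor
      · rintro ⟨hnd, hall⟩
        refine ⟨⟨?_, hnd⟩, ?_⟩
        · intro hin
          have := hall _ hin
          simp at this
        · intro x hx
          rcases hx with hx | hx
          · subst hx; exact hc
          · intro hxin
            exact (hall x hx) (Or.inl hxin)
      · rintro ⟨⟨hni, hnd⟩, hall⟩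
        refine ⟨hnd, ?_⟩
        intro x hx hxin
        rcases hxin with hxin | hxin
        · exact hall x (Or.inr hx) hxin
        · exact hni (hxin ▸ hx)

-- adjacent-pair scan on a (≤)-sorted list decides Nodup
theorem pvBAdj_iff : ∀ (l : List String), l.Pairwise (· ≤ ·) → (pvBAdj l = true ↔ l.Nodup)
  | [] => by intro _; simp [pvBAdj]
  | [_] => by intro _; simp [pvBAdj]
  | x :: y :: r => by
    intro hp
    by_cases hxy : x = y
    · subst hxy
      simp [pvBAdj]
    · rw [show pvBAdj (x :: y :: r) = pvBAdj (y :: r) from by simp [pvBAdj, hxy]]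
      rw [pvBAdj_iff (y :: r) hp.of_cons]
      constructor
      · intro hnd
        rw [List.nodup_cons]
        refine ⟨?_, hnd⟩
        intro hx
        rcases List.mem_cons.1 hx with h | h
        · exact hxy h
        · have hxle : x ≤ y := (List.pairwise_cons.1 hp).1 y (by simp)
          have hyle : y ≤ x := (List.pairwise_cons.1 hp.of_cons).1 x h
          exact hxy (le_antisymm hxle hyle)
      · intro h; exact (List.nodup_cons.1 h).2

-- B's substring list equals the list A's loop examines
theorem pvBSubs_eq (cs : List Char) (k : Int) :
    (PySem.List.pyRange 0 ((cs.length : Int) - k + 1) 1).map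
      (fun i => String.ofList (PySem.List.slice cs (some i) (some (i + k)))) =
    pvSubs cs k 0 (((cs.length : Int) - k + 1).toNat) := by
  rw [PySem.List.pyRange_one, List.map_map]
  unfold pvSubs
  simp only [sub_zero]
  refine List.map_congr_left ?_
  intro j _
  simp only [Function.comp_apply]

-- a slice s[i:i+k] with 0 ≤ i+k and k ≤ 0 is empty
theorem pvSliceEmpty (cs : List Char) (i k : Int) (hik : 0 ≤ i + k) (hk : k ≤ 0) :
    PySem.List.slice cs (some i) (some (i + k)) = [] := by
  have hi : 0 ≤ i := by omega
  rw [PySem.List.slice_toNat cs hi hik]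
  have h0 : (i + k).toNat - i.toNat = 0 := by omega
  simp [h0]

-- any slice of the empty list is empty
theorem pvSliceNil (a b : Int) : PySem.List.slice ([] : List Char) (some a) (some b) = [] := by
  apply List.eq_nil_of_length_eq_zero
  rw [PySem.List.length_slice]
  simp only [PySem.List.clampIdx, List.length_nil]
  split_ifs <;> omega

-- with k ≤ 0 and at least two substrings examined, A's substring list has a duplicate
theorem pvSubs_not_nodup (cs : List Char) (k : Int) (m : Nat)
    (hk : k ≤ 0) (hm : 2 ≤ m) (hmn : (m : Int) = (cs.length : Int) - k + 1) :
    ¬ (pvSubs cs k 0 m).Nodup := by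
  intro hnd
  rw [List.nodup_iff_injective_get] at hnd
  have hp : m - 2 < m := by omega
  have hq : m - 1 < m := by omega
  have hemp : ∀ (t : Nat) (ht : t < m) (_hlo : m - 2 ≤ t),
      (pvSubs cs k 0 m)[t]'(by rw [pvSubs_length]; exact ht) = String.ofList [] := by
    intro t ht hlo
    rw [pvSubs_getElem cs k 0 m t ht]
    by_cases hcs : cs = []
    · subst hcs
      rw [pvSliceNil]
    · have h1 : (1 : Int) ≤ (cs.length : Int) := by
        have := List.length_pos_of_ne_nil hcs
        omega
      have hik : 0 ≤ (0 : Int) + (t : Int) + k := by omega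
      rw [pvSliceEmpty cs (0 + (t : Int)) k hik hk]
  have heq : (pvSubs cs k 0 m).get ⟨m - 2, by rw [pvSubs_length]; exact hp⟩ =
      (pvSubs cs k 0 m).get ⟨m - 1, by rw [pvSubs_length]; exact hq⟩ := by
    rw [List.get_eq_getElem, List.get_eq_getElem]
    rw [hemp (m - 2) hp (by omega), hemp (m - 1) hq (by omega)]
  have := hnd heq
  simp only [Fin.mk.injEq] at this
  omega

-- ===== VERDICT (by name: the statements are the Claim_ definitions above) =====
theorem all_k_substrings_distinct_spec : Claim_unchanged_all_k_substrings_distinct := by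
  intro s k _ hnd
  unfold D_all_k_substrings_distinct at hnd
  push Not at hnd
  unfold all_k_substrings_distinct all_k_substrings_distinct_alt
  dsimp only
  · rw [if_neg (by omega : ¬ k < 0)]
    rw [pvBSubs_eq]
    set m := (((s.toList.length : Int) - k + 1).toNat) with hm
    have hperm : ((pvSubs s.toList k 0 m).mergeSort (fun a b => a ≤ b)).Perm (pvSubs s.toList k 0 m) :=
      List.mergeSort_perm _ _
    have hsorted : ((pvSubs s.toList k 0 m).mergeSort (fun a b => a ≤ b)).Pairwise (· ≤ ·) := by
      have := List.pairwise_mergeSort (le := fun a b : String => decide (a ≤ b))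
        (fun a b c hab hbc => by simp only [decide_eq_true_eq] at *; exact le_trans hab hbc)
        (fun a b => by simp only [Bool.or_eq_true, decide_eq_true_eq]; exact le_total a b)
        (pvSubs s.toList k 0 m)
      simpa using this
    have hB : pvBAdj ((pvSubs s.toList k 0 m).mergeSort (fun a b => a ≤ b)) = true ↔
        (pvSubs s.toList k 0 m).Nodup := by
      rw [pvBAdj_iff _ hsorted]
      exact hperm.nodup_iff
    by_cases hgt : k > (s.toList.length : Int)
    · rw [if_pos hgt]
      have hm0 : m = 0 := by omega
      have hnil : pvSubs s.toList k 0 m = [] := by rw [hm0]; simp [pvSubs]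
      rw [hnil] at hB ⊢
      exact (hB.mpr (by simp)).symm
    · rw [if_neg hgt]
      have hA := pvALoop_iff s.toList k m 0 PySem.Set.empty
      simp only [PySem.Set.empty, List.not_mem_nil, not_false_iff, imp_true_iff, and_true] at hA
      cases hb : pvBAdj ((pvSubs s.toList k 0 m).mergeSort (fun a b => a ≤ b)) with
      | true => exact hA.mpr (hB.mp hb)
      | false =>
        cases ha : pvALoop s.toList k m 0 ([] : PySem.Set String) with
        | true =>
          have hbt := hB.mpr (hA.mp ha)
          rw [hbt] at hb
          cases hb
        | false => simpa [PySem.Set.empty] using ha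

theorem all_k_substrings_distinct_changed : Claim_changed_all_k_substrings_distinct := by
  unfold Claim_changed_all_k_substrings_distinct; decide

theorem all_k_substrings_distinct_tight : Claim_exact_all_k_substrings_distinct := by
  intro s k _ hd
  have hk0 : k < 0 := hd
  unfold all_k_substrings_distinct all_k_substrings_distinct_alt
  dsimp only
  rw [if_pos hk0]
  have hgt : ¬ k > (s.toList.length : Int) := by
    have : (0 : Int) ≤ (s.toList.length : Int) := by positivity
    omega
  rw [if_neg hgt]
  set m := (((s.toList.length : Int) - k + 1).toNat) with hm
  have hm2 : 2 ≤ m := by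
    have h0 : (0 : Int) ≤ (s.toList.length : Int) := by positivity
    omega
  have hmn : ((m : Nat) : Int) = (s.toList.length : Int) - k + 1 := by omega
  have hnn := pvSubs_not_nodup s.toList k m (le_of_lt hk0) hm2 hmn
  have hA := pvALoop_iff s.toList k m 0 PySem.Set.empty
  simp only [PySem.Set.empty, List.not_mem_nil, not_false_iff, imp_true_iff, and_true] at hA
  intro hcontra
  exact hnn (hA.mp hcontra)
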